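-- pv_equiv track=rewrite | github.com/vschellervidal/geneweb_python | code/src/geneweb/domain/gedcom_normalizer.py | normalize_gedcom_content
-- ===== SOURCE A (Python) =====
-- def normalize_gedcom_content(content: str) -> str:
--     """Normalise le contenu GEDCOM pour les comparaisons.
--
--     Args:
--         content: Contenu GEDCOM brut
--
--     Returns:
--         Contenu GEDCOM normalisé
--     """
--     lines = content.splitlines()
--     normalized_lines = []
--
--     for line in lines:
--         # Supprimer les espaces en fin de ligne
--         line = line.rstrip()
--
--         # Ignorer les lignes vides
--         if not line.strip():
--             continue
--
--         normalized_lines.append(line)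
--
--     # Normaliser l'ordre des champs HEAD
--     normalized_lines = _normalize_head_order(normalized_lines)
--
--     return "\n".join(normalized_lines) + "\n"
--
-- def _normalize_head_order(lines: list[str]) -> list[str]:
--     """Normalise l'ordre des champs dans la section HEAD.
--
--     Args:
--         lines: Lignes GEDCOM
--
--     Returns:
--         Lignes avec ordre HEAD normalisé
--     """
--     if not lines or not lines[0].startswith("0 HEAD"):
--         return lines
--
--     # Trouver la section HEAD
--     head_start = 0
--     head_end = len(lines)
--
--     for i, line in enumerate(lines[1:], 1):
--         if line.startswith("0 "):
--             head_end = i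
--             break
--
--     # Extraire et réorganiser les champs HEAD
--     head_lines = lines[head_start:head_end]
--     head_line = head_lines[0]  # "0 HEAD"
--     head_fields = head_lines[1:]  # Champs 1 CHAR, 1 SOUR, etc.
--
--     # Ordre préféré pour les champs HEAD
--     preferred_order = [
--         "1 CHAR",
--         "1 SOUR",
--         "1 SUBM",
--         "1 DEST",
--         "1 DATE",
--         "1 FILE",
--         "1 GEDC",
--         "1 LANG",
--         "1 PLAC",
--         "1 NOTE",
--     ]
--
--     # Réorganiser selon l'ordre préféré
--     ordered_fields = []
--     remaining_fields = head_fields.copy()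
--
--     for pattern in preferred_order:
--         for field in remaining_fields[:]:
--             if field.startswith(pattern):
--                 ordered_fields.append(field)
--                 remaining_fields.remove(field)
--
--     # Ajouter les champs restants non reconnus
--     ordered_fields.extend(remaining_fields)
--
--     # Reconstruire les lignes
--     result = lines[:head_start]
--     result.append(head_line)
--     result.extend(ordered_fields)
--     result.extend(lines[head_end:])
--
--     return result
-- ===== SOURCE B (Python) =====
-- _PREFERRED = [
--     "1 CHAR",
--     "1 SOUR",
--     "1 SUBM",
--     "1 DEST",
--     "1 DATE",
--     "1 FILE",
--     "1 GEDC",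
--     "1 LANG",
--     "1 PLAC",
--     "1 NOTE",
-- ]
--
--
-- def _rank(field):
--     for i, pattern in enumerate(_PREFERRED):
--         if field.startswith(pattern):
--             return i
--     return len(_PREFERRED)
--
--
-- def _reorder_head(lines):
--     if not lines or not lines[0].startswith("0 HEAD"):
--         return lines
--     body = lines[1:]
--     k = 0
--     while k < len(body) and not body[k].startswith("0 "):
--         k += 1
--     buckets = [[] for _ in range(len(_PREFERRED) + 1)]
--     for field in body[:k]:
--         buckets[_rank(field)].append(field)
--     return [lines[0]] + [f for b in buckets for f in b] + body[k:]
--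
--
-- def normalize_gedcom_content(content: str) -> str:
--     lines = [s for s in (line.rstrip() for line in content.splitlines()) if s]
--     return "\n".join(_reorder_head(lines)) + "\n"
-- ===== Notes on version B (the rewrite author's own statement) =====
-- stated objective: alternative
-- what changed: A reorders HEAD fields with ten nested passes (one per preferred pattern) that scan a shrinking copy of the field list and call list.remove; B makes a single pass over the HEAD fields, dropping each into a bucket indexed by the first preferred pattern it starts with (sentinel bucket for unmatched), then concatenates the buckets.
import Mathlib
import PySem

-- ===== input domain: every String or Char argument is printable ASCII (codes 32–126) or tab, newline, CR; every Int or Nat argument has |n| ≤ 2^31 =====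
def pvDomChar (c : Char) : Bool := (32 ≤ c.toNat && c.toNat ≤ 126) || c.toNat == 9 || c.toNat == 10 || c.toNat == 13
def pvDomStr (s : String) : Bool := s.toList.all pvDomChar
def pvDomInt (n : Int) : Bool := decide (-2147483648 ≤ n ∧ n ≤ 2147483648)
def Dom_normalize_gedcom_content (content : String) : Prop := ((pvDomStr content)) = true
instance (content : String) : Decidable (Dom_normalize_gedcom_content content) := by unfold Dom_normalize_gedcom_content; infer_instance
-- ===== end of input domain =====

-- B replaces A's ten remove-and-rescan passes over the HEAD fields by one pass that drops each
-- field into a bucket indexed by its first matching preferred pattern (alternative decomposition).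

-- preferred_order (the same constant literal in both Pythons)
def pvPreferred : List (List Char) :=
  ["1 CHAR".toList, "1 SOUR".toList, "1 SUBM".toList, "1 DEST".toList, "1 DATE".toList,
   "1 FILE".toList, "1 GEDC".toList, "1 LANG".toList, "1 PLAC".toList, "1 NOTE".toList]

-- ===== PORT A =====
-- inner loop: 'for field in remaining[:]: if field.startswith(pattern): ordered.append(field); remaining.remove(field)'
-- list.remove never raises here (each removed field comes from a copy of remaining), so List.erase is exact
def pvInnerA (copy : List (List Char)) (pattern : List Char)
    (ordered remaining : List (List Char)) : List (List Char) × List (List Char) :=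
  match copy with
  | [] => (ordered, remaining)
  | f :: rest =>
    if PySem.Chars.startswith f pattern then
      pvInnerA rest pattern (ordered ++ [f]) (remaining.erase f)
    else
      pvInnerA rest pattern ordered remaining

-- 'for i, line in enumerate(lines[1:], 1): if line.startswith("0 "): head_end = i; break'
def pvHeadEndA (rest : List (List Char)) (i : Nat) (dflt : Nat) : Nat :=
  match rest with
  | [] => dflt
  | l :: rest' => if PySem.Chars.startswith l "0 ".toList then i else pvHeadEndA rest' (i + 1) dflt

def pvNormalizeHeadOrderA (lines : List (List Char)) : List (List Char) :=
  match lines with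
  | [] => lines                                     -- 'if not lines ... : return lines'
  | first :: _ =>
    if !(PySem.Chars.startswith first "0 HEAD".toList) then lines
    else
      let head_start : Nat := 0
      let head_end : Nat := pvHeadEndA (PySem.List.slice lines (some 1) none) 1 lines.length
      let head_lines := PySem.List.slice lines (some (head_start : Int)) (some (head_end : Int))
      let head_line := (PySem.List.pyGet? head_lines 0).getD []   -- head_lines[0]; head_lines is never empty here
      let head_fields := PySem.List.slice head_lines (some 1) none
      let st := pvPreferred.foldl (fun st pattern => pvInnerA st.2 pattern st.1 st.2) ([], head_fields)
      let ordered_fields := st.1 ++ st.2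
      PySem.List.slice lines (some (head_start : Int)) (some (head_start : Int))
        ++ [head_line] ++ ordered_fields ++ PySem.List.slice lines (some (head_end : Int)) none

def normalize_gedcom_content (content : String) : String :=
  let lines := PySem.Chars.splitlines content.toList
  let normalized := lines.foldl (fun acc line =>
      let line := PySem.Chars.rstrip line
      if PySem.Chars.strip line = [] then acc else acc ++ [line]) []
  let normalized := pvNormalizeHeadOrderA normalized
  String.ofList (PySem.Chars.join ['\n'] normalized ++ ['\n'])

-- ===== PORT B =====
-- '_rank': index of the first preferred pattern the field starts with, else len(preferred)
def pvRankB (patterns : List (List Char)) (field : List Char) : Nat :=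
  match patterns with
  | [] => 0
  | p :: ps => if PySem.Chars.startswith field p then 0 else pvRankB ps field + 1

-- 'while k < len(body) and not body[k].startswith("0 "): k += 1'
def pvScanB (body : List (List Char)) : Nat :=
  match body with
  | [] => 0
  | l :: rest => if PySem.Chars.startswith l "0 ".toList then 0 else pvScanB rest + 1

def pvReorderHeadB (lines : List (List Char)) : List (List Char) :=
  match lines with
  | [] => lines
  | first :: body =>
    if !(PySem.Chars.startswith first "0 HEAD".toList) then lines
    else
      let k := pvScanB body
      let buckets := (body.take k).foldl
        (fun bs f => bs.modify (pvRankB pvPreferred f) (fun b => b ++ [f]))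
        (List.replicate (pvPreferred.length + 1) [])
      first :: (buckets.flatten ++ body.drop k)

def normalize_gedcom_content_alt (content : String) : String :=
  let lines := ((PySem.Chars.splitlines content.toList).map PySem.Chars.rstrip).filter
      (fun s => !s.isEmpty)
  String.ofList (PySem.Chars.join ['\n'] (pvReorderHeadB lines) ++ ['\n'])

-- ===== PRECONDITION & SPEC =====
def Spec_normalize_gedcom_content (content : String) (out : String) : Prop := out = normalize_gedcom_content_alt content
instance (content : String) (out : String) : Decidable (Spec_normalize_gedcom_content content out) := by unfold Spec_normalize_gedcom_content; infer_instance

-- ===== CLAIM (what is proved, stated in full; the proofs are below) =====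
def Claim_equal_normalize_gedcom_content : Prop := ∀ (content : String), Dom_normalize_gedcom_content content → Spec_normalize_gedcom_content content (normalize_gedcom_content content)

-- ===== LEMMAS AND PROOFS =====

theorem pv_rstrip_eq_nil_iff (t : List Char) :
    PySem.Chars.rstrip t = [] ↔ ∀ c ∈ t, PySem.Chars.isspace c = true := by
  simp [PySem.Chars.rstrip, List.dropWhile_eq_nil_iff]

theorem pv_rstrip_idem (t : List Char) :
    PySem.Chars.rstrip (PySem.Chars.rstrip t) = PySem.Chars.rstrip t := by
  simp only [PySem.Chars.rstrip, List.reverse_reverse]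
  rw [List.dropWhile_idempotent]

theorem pv_strip_nil_iff (t : List Char) :
    PySem.Chars.strip (PySem.Chars.rstrip t) = [] ↔ PySem.Chars.rstrip t = [] := by
  constructor
  · intro h
    set u := PySem.Chars.rstrip t with hu
    have h' : ∀ c ∈ PySem.Chars.lstrip u, PySem.Chars.isspace c = true :=
      (pv_rstrip_eq_nil_iff (PySem.Chars.lstrip u)).mp h
    have hall : ∀ c ∈ u, PySem.Chars.isspace c = true := by
      intro c hc
      rw [← List.takeWhile_append_dropWhile (p := PySem.Chars.isspace) (l := u)] at hc
      rcases List.mem_append.mp hc with h1 | h2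
      · exact List.mem_takeWhile_imp h1
      · exact h' c h2
    rw [hu, ← pv_rstrip_idem t]
    exact (pv_rstrip_eq_nil_iff u).mpr hall
  · intro h; rw [h]; rfl

theorem pv_lines_eq : ∀ (ls : List (List Char)),
    ls.foldl (fun acc line =>
      let line := PySem.Chars.rstrip line
      if PySem.Chars.strip line = [] then acc else acc ++ [line]) []
    = (ls.map PySem.Chars.rstrip).filter (fun s => !s.isEmpty) := by
  have key : ∀ (ls : List (List Char)) (acc : List (List Char)),
      ls.foldl (fun acc line =>
        let line := PySem.Chars.rstrip line
        if PySem.Chars.strip line = [] then acc else acc ++ [line]) acc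
      = acc ++ (ls.map PySem.Chars.rstrip).filter (fun s => !s.isEmpty) := by
    intro ls
    induction ls with
    | nil => simp
    | cons x rest ih =>
      intro acc
      simp only [List.foldl_cons, List.map_cons, List.filter_cons]
      by_cases h : PySem.Chars.strip (PySem.Chars.rstrip x) = []
      · have hx : (PySem.Chars.rstrip x).isEmpty = true := by
          simp [(pv_strip_nil_iff x).mp h]
        simp [h, hx, ih]
      · have hx : (PySem.Chars.rstrip x).isEmpty = false := by
          rw [List.isEmpty_eq_false_iff]
          intro hn
          exact h ((pv_strip_nil_iff x).mpr hn)
        simp [h, hx, ih]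
  intro ls; simpa using key ls []

-- A's grouping described recursively: the fields matching each pattern in turn, then the leftovers
def pvGroups : List (List Char) → List (List Char) → List (List Char)
  | [], _ => []
  | p :: ps, r => r.filter (fun f => PySem.Chars.startswith f p)
      ++ pvGroups ps (r.filter (fun f => !PySem.Chars.startswith f p))

def pvRest : List (List Char) → List (List Char) → List (List Char)
  | [], r => r
  | p :: ps, r => pvRest ps (r.filter (fun f => !PySem.Chars.startswith f p))

theorem pv_inner_eq (p : List Char) : ∀ (c nm o : List (List Char)),
    (∀ x ∈ nm, PySem.Chars.startswith x p = false) →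
    pvInnerA c p o (nm ++ c) =
      (o ++ c.filter (fun f => PySem.Chars.startswith f p),
       nm ++ c.filter (fun f => !PySem.Chars.startswith f p)) := by
  intro c
  induction c with
  | nil => intro nm o h; simp [pvInnerA]
  | cons f rest ih =>
    intro nm o h
    by_cases hf : PySem.Chars.startswith f p
    · have hfn : f ∉ nm := fun hm => by simp [h f hm] at hf
      have herase : (nm ++ f :: rest).erase f = nm ++ rest := by
        rw [List.erase_append_right _ hfn, List.erase_cons_head]
      simp only [pvInnerA, hf, if_true, herase]
      rw [ih nm (o ++ [f]) h]
      simp [hf]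
    · have h' : ∀ x ∈ nm ++ [f], PySem.Chars.startswith x p = false := by
        intro x hx
        rcases List.mem_append.mp hx with h1 | h2
        · exact h x h1
        · simp at h2; subst h2; simpa using hf
      have : nm ++ f :: rest = (nm ++ [f]) ++ rest := by simp
      simp only [pvInnerA, hf, this]
      rw [ih (nm ++ [f]) o h']
      simp [hf]

theorem pv_outer_eq : ∀ (ps : List (List Char)) (o r : List (List Char)),
    ps.foldl (fun st pattern => pvInnerA st.2 pattern st.1 st.2) (o, r)
      = (o ++ pvGroups ps r, pvRest ps r) := by
  intro ps
  induction ps with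
  | nil => intro o r; simp [pvGroups, pvRest]
  | cons p ps ih =>
    intro o r
    simp only [List.foldl_cons]
    have hin := pv_inner_eq p r [] o (by simp)
    simp only [List.nil_append] at hin
    rw [show pvInnerA (o, r).2 p (o, r).1 (o, r).2 = pvInnerA r p o r from rfl, hin, ih]
    simp [pvGroups, pvRest, List.append_assoc]

theorem pv_rank_le (f : List Char) : ∀ (ps : List (List Char)), pvRankB ps f ≤ ps.length := by
  intro ps
  induction ps with
  | nil => simp [pvRankB]
  | cons p ps ih =>
    by_cases hf : PySem.Chars.startswith f p <;> simp [pvRankB, hf, ih]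

theorem pv_bfold : ∀ (fields : List (List Char)) (bs : List (List (List Char))),
    (∀ f ∈ fields, pvRankB pvPreferred f < bs.length) →
    fields.foldl (fun bs f => bs.modify (pvRankB pvPreferred f) (fun b => b ++ [f])) bs
      = bs.mapIdx (fun i b => b ++ fields.filter (fun f => pvRankB pvPreferred f == i)) := by
  intro fields
  induction fields with
  | nil =>
    intro bs _
    apply List.ext_getElem
    · simp
    · intro i h1 h2; simp [List.getElem_mapIdx]
  | cons f rest ih =>
    intro bs hb
    simp only [List.foldl_cons]
    rw [ih _ (by intro g hg; rw [List.length_modify]; exact hb g (List.mem_cons_of_mem f hg))]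
    apply List.ext_getElem
    · simp
    · intro i h1 h2
      simp only [List.getElem_mapIdx, List.getElem_modify, List.filter_cons]
      by_cases hi : pvRankB pvPreferred f = i
      · simp [hi, List.append_assoc]
      · have : (pvRankB pvPreferred f == i) = false := by simp [hi]
        simp [hi, this]

theorem pv_mapIdx_replicate (n : Nat) (g : Nat → List (List Char)) :
    (List.replicate n ([] : List (List Char))).mapIdx (fun i b => b ++ g i)
      = (List.range n).map g := by
  apply List.ext_getElem
  · simp
  · intro i h1 h2
    simp [List.getElem_mapIdx]

theorem pv_rank_filter_flatten : ∀ (ps : List (List Char)) (r : List (List Char)),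
    ((List.range (ps.length + 1)).map (fun i => r.filter (fun f => pvRankB ps f == i))).flatten
      = pvGroups ps r ++ pvRest ps r := by
  intro ps
  induction ps with
  | nil =>
    intro r
    have : (List.range 1) = [0] := rfl
    simp [this, pvGroups, pvRest, pvRankB]
  | cons p ps ih =>
    intro r
    rw [show (p :: ps).length + 1 = (ps.length + 1) + 1 from rfl, List.range_succ_eq_map]
    simp only [List.map_cons, List.map_map, List.flatten_cons]
    have h0 : r.filter (fun f => pvRankB (p :: ps) f == 0)
        = r.filter (fun f => PySem.Chars.startswith f p) := by
      apply List.filter_congr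
      intro x _
      by_cases hsw : PySem.Chars.startswith x p <;> simp [pvRankB, hsw]
    have hs : ∀ j, r.filter (fun f => pvRankB (p :: ps) f == j + 1)
        = (r.filter (fun f => !PySem.Chars.startswith f p)).filter (fun f => pvRankB ps f == j) := by
      intro j
      rw [List.filter_filter]
      apply List.filter_congr
      intro x _
      by_cases hsw : PySem.Chars.startswith x p <;> simp [pvRankB, hsw]
    have hmap : (List.range (ps.length + 1)).map
          ((fun i => r.filter (fun f => pvRankB (p :: ps) f == i)) ∘ Nat.succ)
        = (List.range (ps.length + 1)).map
          (fun j => (r.filter (fun f => !PySem.Chars.startswith f p)).filter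
            (fun f => pvRankB ps f == j)) := by
      apply List.map_congr_left
      intro j _
      simpa using hs j
    rw [hmap, ih]
    simp [h0, pvGroups, pvRest, List.append_assoc]

theorem pv_headend_eq : ∀ (body : List (List Char)) (i : Nat),
    pvHeadEndA body i (i + body.length) = i + pvScanB body := by
  intro body
  induction body with
  | nil => intro i; simp [pvHeadEndA, pvScanB]
  | cons l rest ih =>
    intro i
    rw [show pvHeadEndA (l :: rest) i (i + (l :: rest).length)
        = if PySem.Chars.startswith l "0 ".toList then i
          else pvHeadEndA rest (i + 1) (i + (l :: rest).length) from rfl]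
    rw [show pvScanB (l :: rest)
        = if PySem.Chars.startswith l "0 ".toList then 0 else pvScanB rest + 1 from rfl]
    by_cases hl : PySem.Chars.startswith l "0 ".toList
    · rw [if_pos hl, if_pos hl]; omega
    · rw [if_neg hl, if_neg hl]
      have h1 : i + (l :: rest).length = (i + 1) + rest.length := by
        simp [List.length_cons]; omega
      rw [h1, ih (i + 1)]
      omega

theorem pv_reorder_eq : ∀ (lines : List (List Char)),
    pvNormalizeHeadOrderA lines = pvReorderHeadB lines := by
  intro lines
  cases lines with
  | nil => rfl
  | cons first body =>
    by_cases h0 : PySem.Chars.startswith first "0 HEAD".toList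
    · have h0t : PySem.Chars.startswith first ['0', ' ', 'H', 'E', 'A', 'D'] = true := by
        simpa using h0
      simp only [pvNormalizeHeadOrderA, pvReorderHeadB]
      -- head_end = 1 + k
      have hdrop1 : PySem.List.slice (first :: body) (some 1) none = body := by
        rw [PySem.List.slice_from _ (by norm_num : (0:Int) ≤ 1)]; rfl
      have hlen : (first :: body).length = 1 + body.length := by simp; omega
      have hhe : pvHeadEndA (PySem.List.slice (first :: body) (some 1) none) 1
          ((first :: body).length) = 1 + pvScanB body := by
        rw [hdrop1, hlen, pv_headend_eq body 1]
      rw [hhe]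
      set k := pvScanB body with hk
      -- slices
      have htake : PySem.List.slice (first :: body) (some ((0:Nat) : Int)) (some ((1 + k : Nat) : Int))
          = first :: body.take k := by
        rw [PySem.List.slice_natCast]
        simp [Nat.add_comm 1 k, List.take_succ_cons]
      have hnil : PySem.List.slice (first :: body) (some ((0:Nat) : Int)) (some ((0:Nat) : Int))
          = [] := by
        rw [PySem.List.slice_natCast]; simp
      have hdropk : PySem.List.slice (first :: body) (some ((1 + k : Nat) : Int)) none
          = body.drop k := by
        rw [PySem.List.slice_from _ (by positivity)]
        simp [Nat.add_comm 1 k]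
      rw [htake, hnil, hdropk]
      have hget : (PySem.List.pyGet? (first :: body.take k) 0).getD [] = first := by
        simp [PySem.List.pyGet?, PySem.List.pyIdx?]
      have hfields : PySem.List.slice (first :: body.take k) (some 1) none = body.take k := by
        rw [PySem.List.slice_from _ (by norm_num : (0:Int) ≤ 1)]; rfl
      rw [hget, hfields, pv_outer_eq]
      -- B side buckets
      have hrank : ∀ f ∈ body.take k, pvRankB pvPreferred f
          < (List.replicate (pvPreferred.length + 1) ([] : List (List Char))).length := by
        intro f _
        rw [List.length_replicate]
        exact Nat.lt_succ_of_le (pv_rank_le f pvPreferred)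
      rw [pv_bfold (body.take k) _ hrank, pv_mapIdx_replicate, pv_rank_filter_flatten]
      simp
    · have h0f : PySem.Chars.startswith first ['0', ' ', 'H', 'E', 'A', 'D'] = false := by
        simpa using h0
      simp [pvNormalizeHeadOrderA, pvReorderHeadB, h0f]

-- ===== VERDICT (by name: the statement is the Claim_ definition above) =====
theorem normalize_gedcom_content_spec : Claim_equal_normalize_gedcom_content := by
  intro content _
  unfold Spec_normalize_gedcom_content normalize_gedcom_content normalize_gedcom_content_alt
  dsimp only
  rw [pv_lines_eq, pv_reorder_eq]
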